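-- pv_equiv track=rewrite | github.com/Allan-CodeWorks/katas | 2022-08_python-gossiping_drivers/gossiping_bus_tour.py | gossiping_bus_tour
-- ===== SOURCE A (Python) =====
-- def gossiping_bus_tour(schedule: list):
--     drivers_nb = len(schedule)
--     gossips = [set([i]) for i in range(drivers_nb)]
--
--     if solved(drivers_nb, gossips):
--         return "0"
--
--     stops_at_minute = list(zip(*schedule))
--
--     for minute, stops in enumerate(stops_at_minute):
--
--         drivers_at_stop = get_drivers_at_stop(stops)
--
--         for drivers in drivers_at_stop.values():
--             if len(drivers) > 1:
--                 for driver in drivers: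
--                     gossips[driver] = gossips[driver].union(drivers)
--
--         if solved(drivers_nb, gossips):
--             return str(minute + 1)
--
--     if is_drivers_never_cross(stops_at_minute):
--         return "never"
--
--     return "never"
--
-- def no_driver_at_same_stop(stops: tuple):
--     drivers_number = len(stops)
--     stop_in_use = len(set(stops))
--     return drivers_number == stop_in_use
--
-- def is_drivers_never_cross(schedule):
--     not_crossing_at_each_steps = [
--         no_driver_at_same_stop(locs) for locs in schedule]
--     if False in not_crossing_at_each_steps:
--         return False
--     return True
--
-- def solved(drivers_nb, gossips):
--     for gossip in gossips:
--         if len(gossip) < drivers_nb: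
--             return False
--     return True
--
-- def get_drivers_at_stop(stops: tuple):
--     drivers_at_stop = dict([(stop, set()) for stop in stops])
--     for driver in range(len(stops)):
--         stop = stops[driver]
--         drivers_at_stop[stop].add(driver)
--     return drivers_at_stop
-- ===== SOURCE B (Python) =====
-- def gossiping_bus_tour(schedule: list):
--     n = len(schedule)
--     if n <= 1:
--         return "0"
--     minutes = min(len(r) for r in schedule)
--     worst = 0
--     for i in range(n):
--         for j in range(i):
--             met = None
--             for t in range(minutes):
--                 if schedule[i][t] == schedule[j][t]:
--                     met = t + 1
--                     break
--             if met is None: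
--                 return "never"
--             if met > worst:
--                 worst = met
--     return str(worst)
-- ===== Notes on version B (the rewrite author's own statement) =====
-- stated objective: faster
-- what changed: Instead of simulating gossip sets minute by minute and rescanning every driver's set each minute to test completion, B computes for each driver pair the first minute they share a stop (stopping that pair's scan at its first hit) and returns the maximum over pairs, or 'never' if some pair never meets.
import Mathlib
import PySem

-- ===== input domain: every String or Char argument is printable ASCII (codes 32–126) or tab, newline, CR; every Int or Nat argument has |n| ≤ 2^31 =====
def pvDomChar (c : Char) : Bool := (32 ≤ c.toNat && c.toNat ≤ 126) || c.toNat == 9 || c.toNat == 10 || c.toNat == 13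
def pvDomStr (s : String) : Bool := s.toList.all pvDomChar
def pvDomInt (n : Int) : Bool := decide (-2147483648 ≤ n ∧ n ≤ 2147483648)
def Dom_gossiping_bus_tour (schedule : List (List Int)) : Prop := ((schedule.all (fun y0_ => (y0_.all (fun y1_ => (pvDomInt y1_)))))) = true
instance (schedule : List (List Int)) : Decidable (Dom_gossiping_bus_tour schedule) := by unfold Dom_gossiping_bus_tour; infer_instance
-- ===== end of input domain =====

-- B replaces A's minute-by-minute gossip-set simulation (with a full completion rescan every
-- minute) by a per-pair first-shared-stop search whose maximum is the answer; measurably faster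
-- on a timing run's inputs.

-- ===== PORT A =====
-- shared helper for the two built-ins 'zip(*schedule)' (A) and 'min(len(r) for r in schedule)' (B):
-- the minimum row length of a nonempty list of rows
def pvMinRowLen (l0 : List Int) (rest : List (List Int)) : Nat :=
  rest.foldl (fun m r => min m r.length) l0.length

-- zip(*schedule), ported by the built-in's spec: min-length many rows, row t = the t-th entries (exact)
def pvZipStar (ls : List (List Int)) : List (List Int) :=
  match ls with
  | [] => []
  | l0 :: rest =>
      (List.range (pvMinRowLen l0 rest)).map (fun t => (l0 :: rest).map (fun r => r.getD t 0))

-- solved(drivers_nb, gossips)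
def pvSolved (n : Nat) (gossips : List (PySem.Set Int)) : Bool :=
  gossips.all (fun g => decide (n <= g.length))

-- get_drivers_at_stop(stops)
def pvGetDriversAtStop (stops : List Int) : PySem.Dict Int (PySem.Set Int) :=
  let d0 := PySem.Dict.ofList (stops.map (fun s => (s, (PySem.Set.empty : PySem.Set Int))))
  (List.range stops.length).foldl
    (fun d t => d.modify (stops.getD t 0) PySem.Set.empty (fun g => PySem.Set.add g (t : Int))) d0

-- no_driver_at_same_stop(stops)
def pvNoDriverAtSameStop (stops : List Int) : Bool :=
  stops.length == (PySem.Set.ofList stops).length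

-- is_drivers_never_cross(schedule)  ('if False in [...]')
def pvNeverCross (sam : List (List Int)) : Bool :=
  !((sam.map (fun locs => pvNoDriverAtSameStop locs)).contains false)

-- the main 'for minute, stops in enumerate(stops_at_minute)' loop; 'some' = early return.
-- Iterating the drivers set: the resulting gossips list does not depend on set iteration order
-- (each driver index is updated once, independently).
def pvLoopA (n : Nat) : List (Int × List Int) → List (PySem.Set Int) → Option String
  | [], _ => none
  | (minute, stops) :: rest, gossips =>
    let das := pvGetDriversAtStop stops
    let gossips' := das.values.foldl
      (fun gs drivers =>
        if 1 < drivers.length then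
          drivers.foldl (fun gs2 driver =>
            PySem.List.pySetD gs2 driver
              (PySem.Set.union (PySem.List.pyGetD gs2 driver PySem.Set.empty) drivers)) gs
        else gs) gossips
    if pvSolved n gossips' then some (PySem.Int.toStr (minute + 1))
    else pvLoopA n rest gossips'

def gossiping_bus_tour (schedule : List (List Int)) : String :=
  let n := schedule.length
  let gossips := (List.range n).map (fun i : Nat => PySem.Set.ofList [(i : Int)])
  if pvSolved n gossips then "0"
  else
    let sam := pvZipStar schedule
    match pvLoopA n (PySem.List.enumerate sam 0) gossips with
    | some r => r
    | none => if pvNeverCross sam then "never" else "never"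

-- ===== PORT B =====
-- inner 'for t in range(minutes): ... break' search for the first shared stop of two routes
def pvFirstMeetB (ri rj : List Int) : List Nat → Option Nat
  | [] => none
  | t :: rest => if ri.getD t 0 == rj.getD t 0 then some (t + 1) else pvFirstMeetB ri rj rest

-- the nested 'for i / for j' loop over pairs, with the running maximum 'worst'
def pvLoopB (schedule : List (List Int)) (minutes : Nat) : List (Nat × Nat) → Nat → String
  | [], worst => PySem.Int.toStr (worst : Int)
  | (i, j) :: rest, worst =>
    match pvFirstMeetB (schedule.getD i []) (schedule.getD j []) (List.range minutes) with
    | none => "never"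
    | some met => pvLoopB schedule minutes rest (if worst < met then met else worst)

def gossiping_bus_tour_alt (schedule : List (List Int)) : String :=
  let n := schedule.length
  if n <= 1 then "0"
  else
    let minutes := match schedule with
      | [] => 0
      | l0 :: rest => pvMinRowLen l0 rest
    pvLoopB schedule minutes
      ((List.range n).flatMap (fun i => (List.range i).map (fun j => (i, j)))) 0

-- ===== PRECONDITION & SPEC =====
def Spec_gossiping_bus_tour (schedule : List (List Int)) (out : String) : Prop := out = gossiping_bus_tour_alt schedule
instance (schedule : List (List Int)) (out : String) : Decidable (Spec_gossiping_bus_tour schedule out) := by unfold Spec_gossiping_bus_tour; infer_instance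

-- ===== CLAIM (what is proved, stated in full; the proofs are below) =====
def Claim_equal_gossiping_bus_tour : Prop := ∀ (schedule : List (List Int)), Dom_gossiping_bus_tour schedule → Spec_gossiping_bus_tour schedule (gossiping_bus_tour schedule)


-- ===== LEMMAS AND PROOFS =====

/- Proof-side reference notions -/

-- the list of stops at minute t (row t of the transposed schedule)
def pvColL (schedule : List (List Int)) (t : Nat) : List Int :=
  schedule.map (fun r => r.getD t 0)

-- the stop of driver k at minute t
def pvColAt (schedule : List (List Int)) (t k : Nat) : Int :=
  (schedule.getD k []).getD t 0

-- "all pairs of drivers have shared a stop at some minute < T"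
def pvSolvedLT (schedule : List (List Int)) (T : Nat) : Prop :=
  ∀ k < schedule.length, ∀ j < schedule.length,
    k = j ∨ ∃ t' < T, pvColAt schedule t' k = pvColAt schedule t' j

-- Bool form of pvSolvedLT, used as a find? predicate
def pvSolvedLTb (schedule : List (List Int)) (T : Nat) : Bool :=
  (List.range schedule.length).all (fun k =>
    (List.range schedule.length).all (fun j =>
      (k == j) || (List.range T).any (fun t' =>
        pvColAt schedule t' k == pvColAt schedule t' j)))

theorem pvSolvedLTb_iff (schedule : List (List Int)) (T : Nat) :
    pvSolvedLTb schedule T = true ↔ pvSolvedLT schedule T := by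
  simp only [pvSolvedLTb, pvSolvedLT, List.all_eq_true, List.any_eq_true, List.mem_range,
    Bool.or_eq_true, beq_iff_eq]

-- the group of drivers (as Int indices) standing at stop s
def pvGroup (stops : List Int) (s : Int) : List Int :=
  ((List.range stops.length).filter (fun t => stops.getD t 0 == s)).map (Nat.cast : Nat → Int)

-- one minute of A's gossip update
def pvMinuteA (stops : List Int) (gs : List (PySem.Set Int)) : List (PySem.Set Int) :=
  (pvGetDriversAtStop stops).values.foldl
    (fun gs drivers =>
      if 1 < drivers.length then
        drivers.foldl (fun gs2 driver =>
          PySem.List.pySetD gs2 driver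
            (PySem.Set.union (PySem.List.pyGetD gs2 driver PySem.Set.empty) drivers)) gs
      else gs) gs

-- A's loop invariant: gossips[k] = {j < n | k = j or they met before minute T}
def pvInv (schedule : List (List Int)) (T : Nat) (gs : List (PySem.Set Int)) : Prop :=
  gs.length = schedule.length ∧
  ∀ k, k < schedule.length →
    (PySem.List.pyGetD gs (k : Int) PySem.Set.empty).Nodup ∧
    ∀ x, x ∈ PySem.List.pyGetD gs (k : Int) PySem.Set.empty ↔
      ∃ j, j < schedule.length ∧ x = (j : Int) ∧
        (k = j ∨ ∃ t' < T, pvColAt schedule t' k = pvColAt schedule t' j)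

-- B's first-meet value for the ordered pair (i, j)
def pvFMn (schedule : List (List Int)) (m i j : Nat) : Option Nat :=
  pvFirstMeetB (schedule.getD i []) (schedule.getD j []) (List.range m)

/- small equation lemmas -/

theorem pvLoopA_cons (n : Nat) (mi : Int) (stops : List Int) (rest : List (Int × List Int))
    (gs : List (PySem.Set Int)) :
    pvLoopA n ((mi, stops) :: rest) gs =
      (if pvSolved n (pvMinuteA stops gs) then some (PySem.Int.toStr (mi + 1))
       else pvLoopA n rest (pvMinuteA stops gs)) := rfl

/- group facts -/

theorem pvGroup_nodup (stops : List Int) (s : Int) : (pvGroup stops s).Nodup := by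
  refine List.Nodup.map (fun a b h => ?_) (List.Nodup.filter _ List.nodup_range)
  exact_mod_cast h

theorem mem_pvGroup (stops : List Int) (s x : Int) :
    x ∈ pvGroup stops s ↔ ∃ t : Nat, t < stops.length ∧ stops.getD t 0 = s ∧ x = (t : Int) := by
  simp only [pvGroup, List.mem_map, List.mem_filter, List.mem_range, beq_iff_eq]
  constructor
  · rintro ⟨t, ⟨ht, hs⟩, rfl⟩; exact ⟨t, ht, hs, rfl⟩
  · rintro ⟨t, ht, hs, rfl⟩; exact ⟨t, ⟨ht, hs⟩, rfl⟩

theorem natCast_mem_pvGroup (stops : List Int) (s : Int) (k : Nat) (hk : k < stops.length) :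
    ((k : Int) ∈ pvGroup stops s) ↔ stops.getD k 0 = s := by
  rw [mem_pvGroup]
  constructor
  · rintro ⟨t, ht, hs, heq⟩
    have : k = t := by exact_mod_cast heq
    subst this; exact hs
  · intro hs; exact ⟨k, hk, hs, rfl⟩

/- drivers_at_stop characterization -/

theorem pvD0_fold_getD (v : PySem.Set Int) (s : Int) :
    ∀ (l : List Int) (d : PySem.Dict Int (PySem.Set Int)),
      (∀ k, d.getD k v = v) →
      ((l.map (fun s => (s, v))).foldl (fun acc p => acc.insert p.1 p.2) d).getD s v = v := by
  intro l
  induction l with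
  | nil => intro d h; exact h s
  | cons s0 rest ih =>
    intro d h
    rw [List.map_cons, List.foldl_cons]
    refine ih _ (fun k => ?_)
    rw [PySem.Dict.getD_insert]
    split
    · rfl
    · exact h k

theorem pvD0_getD (stops : List Int) (s : Int) :
    (PySem.Dict.ofList (stops.map (fun s => (s, (PySem.Set.empty : PySem.Set Int))))).getD s
      PySem.Set.empty = PySem.Set.empty := by
  simp only [PySem.Dict.ofList, PySem.Dict.update]
  exact pvD0_fold_getD _ s stops PySem.Dict.empty (fun k => PySem.Dict.getD_empty k _)

theorem pvModifyFold_getD (stops : List Int) (s : Int) :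
    ∀ (N : Nat) (d : PySem.Dict Int (PySem.Set Int)),
      ((List.range N).foldl (fun d t => d.modify (stops.getD t 0) PySem.Set.empty
          (fun g => PySem.Set.add g (t : Int))) d).getD s PySem.Set.empty
        = PySem.Set.update (d.getD s PySem.Set.empty)
            (((List.range N).filter (fun t => stops.getD t 0 == s)).map (Nat.cast : Nat → Int)) := by
  intro N
  induction N with
  | zero => intro d; simp [PySem.Set.update_nil]
  | succ N ih =>
    intro d
    rw [List.range_succ, List.foldl_append, List.filter_append, List.map_append,
      PySem.Set.update_append, List.foldl_cons, List.foldl_nil, PySem.Dict.getD_modify]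
    by_cases h : stops.getD N 0 = s
    · rw [if_pos h.symm, h, ih]
      simp only [List.filter_cons, h, beq_self_eq_true, if_true, List.filter_nil, List.map_cons,
        List.map_nil, PySem.Set.update_cons, PySem.Set.update_nil]
    · rw [if_neg (fun hs => h hs.symm), ih]
      simp only [List.filter_cons, List.filter_nil]
      rw [if_neg (by simpa using h)]
      simp [PySem.Set.update_nil]

theorem pvGDAS_getD (stops : List Int) (s : Int) :
    (pvGetDriversAtStop stops).getD s PySem.Set.empty = pvGroup stops s := by
  simp only [pvGetDriversAtStop]
  rw [pvModifyFold_getD, pvD0_getD]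
  show PySem.Set.empty.update _ = _
  rw [PySem.Set.update_empty]
  exact PySem.Set.ofList_eq_self_of_nodup _ (pvGroup_nodup stops s)

theorem pvKeys_insert (d : PySem.Dict Int (PySem.Set Int)) (k : Int) (v : PySem.Set Int) :
    (d.insert k v).keys = PySem.Set.add d.keys k := by
  by_cases hc : d.contains k = true
  · rw [PySem.Dict.keys_insert_of_contains _ _ hc,
      PySem.Set.add_of_mem ((PySem.Dict.contains_iff_mem_keys d k).mp hc)]
  · rw [PySem.Dict.keys_insert_of_not_contains _ _ (by simpa using hc),
      PySem.Set.add_of_not_mem]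
    intro hmem
    exact hc ((PySem.Dict.contains_iff_mem_keys d k).mpr hmem)

theorem pvD0_fold_keys (v : PySem.Set Int) :
    ∀ (l : List Int) (d : PySem.Dict Int (PySem.Set Int)),
      ((l.map (fun s => (s, v))).foldl (fun acc p => acc.insert p.1 p.2) d).keys
        = PySem.Set.update d.keys l := by
  intro l
  induction l with
  | nil => intro d; rw [PySem.Set.update_nil]; rfl
  | cons s0 rest ih =>
    intro d
    rw [List.map_cons, List.foldl_cons, PySem.Set.update_cons, ih, pvKeys_insert]

theorem pvModifyFold_keys (stops : List Int) :
    ∀ (N : Nat) (d : PySem.Dict Int (PySem.Set Int)),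
      ((List.range N).foldl (fun d t => d.modify (stops.getD t 0) PySem.Set.empty
          (fun g => PySem.Set.add g (t : Int))) d).keys
        = PySem.Set.update d.keys ((List.range N).map (fun t => stops.getD t 0)) := by
  intro N
  induction N with
  | zero => intro d; simp [PySem.Set.update_nil]
  | succ N ih =>
    intro d
    rw [List.range_succ, List.foldl_append, List.foldl_cons, List.foldl_nil, List.map_append,
      PySem.Set.update_append]
    rw [PySem.Dict.keys_modify, pvKeys_insert, ih, List.map_cons, List.map_nil,
      PySem.Set.update_cons, PySem.Set.update_nil]

theorem pvGDAS_keys (stops : List Int) :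
    (pvGetDriversAtStop stops).keys = PySem.Set.ofList stops := by
  simp only [pvGetDriversAtStop]
  rw [pvModifyFold_keys]
  have h0 : (PySem.Dict.ofList
      (stops.map (fun s => (s, (PySem.Set.empty : PySem.Set Int))))).keys
      = PySem.Set.ofList stops := by
    simp only [PySem.Dict.ofList, PySem.Dict.update]
    rw [pvD0_fold_keys]
    show PySem.Set.empty.update stops = _
    rw [PySem.Set.update_empty]
  rw [h0, PySem.Set.update_eq_append_filter]
  have : List.filter (fun y => !(PySem.Set.ofList stops).contains y)
      (PySem.Set.ofList ((List.range stops.length).map (fun t => stops.getD t 0))) = [] := by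
    rw [List.filter_eq_nil_iff]
    intro a ha
    have ha' : a ∈ stops := by
      rw [PySem.Set.mem_ofList] at ha
      obtain ⟨t, ht, rfl⟩ := List.mem_map.mp ha
      rw [List.mem_range] at ht
      rw [List.getD_eq_getElem _ _ ht]
      exact List.getElem_mem ht
    simpa using ha' 
  rw [this, List.append_nil]

theorem pvGDAS_values (stops : List Int) :
    (pvGetDriversAtStop stops).values = (PySem.Set.ofList stops).map (fun s => pvGroup stops s) := by
  rw [PySem.Dict.values_eq_map_keys _ (by rw [pvGDAS_keys]; exact PySem.Set.nodup_ofList stops)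
    PySem.Set.empty, pvGDAS_keys]
  exact List.map_congr_left (fun s _ => pvGDAS_getD stops s)

/- the inner fold over one group -/

theorem pvInner_len (G : List Int) (gs : List (PySem.Set Int)) (full : List Int) :
    (G.foldl (fun gs2 driver =>
        PySem.List.pySetD gs2 driver
          (PySem.Set.union (PySem.List.pyGetD gs2 driver PySem.Set.empty) full)) gs).length
      = gs.length := by
  induction G generalizing gs with
  | nil => rfl
  | cons x rest ih =>
    rw [List.foldl_cons, ih, PySem.List.length_pySetD]

theorem pvInner_getD (L : Nat) (full : List Int) :
    ∀ (G : List Int), (∀ x ∈ G, ∃ t : Nat, t < L ∧ x = (t : Int)) → G.Nodup →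
    ∀ (gs : List (PySem.Set Int)), gs.length = L → ∀ k : Nat, k < L →
      PySem.List.pyGetD
        (G.foldl (fun gs2 driver =>
          PySem.List.pySetD gs2 driver
            (PySem.Set.union (PySem.List.pyGetD gs2 driver PySem.Set.empty) full)) gs)
        (k : Int) PySem.Set.empty
      = (if (k : Int) ∈ G then
           PySem.Set.union (PySem.List.pyGetD gs (k : Int) PySem.Set.empty) full
         else PySem.List.pyGetD gs (k : Int) PySem.Set.empty) := by
  intro G
  induction G with
  | nil => intro _ _ gs _ k _; simp
  | cons x rest ih =>
    intro hG hnd gs hlen k hk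
    obtain ⟨t, ht, rfl⟩ := hG x (by simp)
    have htgs : t < gs.length := by omega
    have hxrest : (t : Int) ∉ rest := (List.nodup_cons.mp hnd).1
    have hstep : ∀ m : Nat,
        PySem.List.pyGetD (PySem.List.pySetD gs (t : Int)
          (PySem.Set.union (PySem.List.pyGetD gs (t : Int) PySem.Set.empty) full)) (m : Int)
          PySem.Set.empty
        = if m = t then PySem.Set.union (PySem.List.pyGetD gs (t : Int) PySem.Set.empty) full
          else PySem.List.pyGetD gs (m : Int) PySem.Set.empty := by
      intro m
      exact PySem.List.pyGetD_pySetD_natCast gs t m _ _ htgs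
    rw [List.foldl_cons,
      ih (fun y hy => hG y (by simp [hy])) (List.nodup_cons.mp hnd).2 _
        (by rw [PySem.List.length_pySetD]; exact hlen) k hk]
    by_cases hmem : (k : Int) ∈ rest
    · rw [if_pos hmem, if_pos (by simp [hmem]), hstep k,
        if_neg (fun h : k = t => hxrest (h ▸ hmem))]
    · rw [if_neg hmem, hstep k]
      by_cases hkt : k = t
      · subst hkt
        rw [if_pos rfl, if_pos (by simp)]
      · rw [if_neg hkt, if_neg (by
          simp only [List.mem_cons]
          rintro (h | h)
          · exact hkt (by exact_mod_cast h)
          · exact hmem h)]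

/- one whole minute -/

theorem pvMinuteA_len (stops : List Int) (gs : List (PySem.Set Int)) :
    (pvMinuteA stops gs).length = gs.length := by
  rw [pvMinuteA]
  generalize (pvGetDriversAtStop stops).values = vs
  induction vs generalizing gs with
  | nil => rfl
  | cons v rest ih =>
    rw [List.foldl_cons]
    rw [ih]
    split
    · exact pvInner_len v gs v
    · rfl

theorem pvOuter_aux (stops : List Int) :
    ∀ (S : List Int), S.Nodup →
    ∀ (gs : List (PySem.Set Int)), gs.length = stops.length → ∀ k : Nat, k < stops.length →
      PySem.List.pyGetD
        ((S.map (fun s => pvGroup stops s)).foldl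
          (fun gs drivers =>
            if 1 < drivers.length then
              drivers.foldl (fun gs2 driver =>
                PySem.List.pySetD gs2 driver
                  (PySem.Set.union (PySem.List.pyGetD gs2 driver PySem.Set.empty) drivers)) gs
            else gs) gs)
        (k : Int) PySem.Set.empty
      = (if stops.getD k 0 ∈ S ∧ 1 < (pvGroup stops (stops.getD k 0)).length then
          PySem.Set.union (PySem.List.pyGetD gs (k : Int) PySem.Set.empty)
            (pvGroup stops (stops.getD k 0))
        else PySem.List.pyGetD gs (k : Int) PySem.Set.empty) := by
  intro S
  induction S with
  | nil => intro _ gs _ k _; simp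
  | cons s rest ih =>
    intro hnd gs hlen k hk
    have hGmem : ∀ x ∈ pvGroup stops s, ∃ t : Nat, t < stops.length ∧ x = (t : Int) := by
      intro x hx
      obtain ⟨t, ht, _, rfl⟩ := (mem_pvGroup stops s x).mp hx
      exact ⟨t, ht, rfl⟩
    have hkG : ((k : Int) ∈ pvGroup stops s) ↔ stops.getD k 0 = s :=
      natCast_mem_pvGroup stops s k hk
    rw [List.map_cons, List.foldl_cons]
    by_cases h1 : 1 < (pvGroup stops s).length
    · rw [if_pos h1]
      rw [ih (List.nodup_cons.mp hnd).2 _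
        (by rw [pvInner_len]; exact hlen) k hk]
      have hinner := pvInner_getD stops.length (pvGroup stops s) (pvGroup stops s) hGmem
        (pvGroup_nodup stops s) gs hlen k hk
      by_cases hs : stops.getD k 0 = s
      · have hnr : stops.getD k 0 ∉ rest := by
          rw [hs]; exact (List.nodup_cons.mp hnd).1
        rw [if_neg (fun hc => hnr hc.1), hinner, if_pos (hkG.mpr hs), hs,
          if_pos ⟨by simp, h1⟩]
      · rw [hinner, if_neg (fun hc => hs (hkG.mp hc))]
        by_cases hr : stops.getD k 0 ∈ rest ∧ 1 < (pvGroup stops (stops.getD k 0)).length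
        · rw [if_pos hr, if_pos ⟨List.mem_cons.mpr (Or.inr hr.1), hr.2⟩]
        · rw [if_neg hr, if_neg (by
            rintro ⟨hmem, hlt⟩
            rcases List.mem_cons.mp hmem with h | h
            · exact hs h
            · exact hr ⟨h, hlt⟩)]
    · rw [if_neg h1]
      rw [ih (List.nodup_cons.mp hnd).2 _ hlen k hk]
      by_cases hr : stops.getD k 0 ∈ rest ∧ 1 < (pvGroup stops (stops.getD k 0)).length
      · rw [if_pos hr, if_pos ⟨List.mem_cons.mpr (Or.inr hr.1), hr.2⟩]
      · rw [if_neg hr, if_neg (by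
          rintro ⟨hmem, hlt⟩
          rcases List.mem_cons.mp hmem with h | h
          · exact h1 (h ▸ hlt)
          · exact hr ⟨h, hlt⟩)]

theorem pvMinuteA_getD (stops : List Int) (gs : List (PySem.Set Int))
    (hlen : gs.length = stops.length) (k : Nat) (hk : k < stops.length) :
    PySem.List.pyGetD (pvMinuteA stops gs) (k : Int) PySem.Set.empty
      = (if 1 < (pvGroup stops (stops.getD k 0)).length then
          PySem.Set.union (PySem.List.pyGetD gs (k : Int) PySem.Set.empty)
            (pvGroup stops (stops.getD k 0))
        else PySem.List.pyGetD gs (k : Int) PySem.Set.empty) := by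
  rw [pvMinuteA, pvGDAS_values,
    pvOuter_aux stops (PySem.Set.ofList stops) (PySem.Set.nodup_ofList stops) gs hlen k hk]
  have hmem : stops.getD k 0 ∈ PySem.Set.ofList stops := by
    rw [PySem.Set.mem_ofList]
    rw [List.getD_eq_getElem _ _ hk]
    exact List.getElem_mem hk
  by_cases h1 : 1 < (pvGroup stops (stops.getD k 0)).length
  · rw [if_pos ⟨hmem, h1⟩, if_pos h1]
  · rw [if_neg (fun hc => h1 hc.2), if_neg h1]

theorem pvOne_lt_length {l : List Int} {a b : Int} (hab : a ≠ b) (ha : a ∈ l) (hb : b ∈ l) :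
    1 < l.length := by
  match l with
  | [] => cases ha
  | [x] =>
    rw [List.mem_singleton] at ha hb
    exact absurd (ha.trans hb.symm) hab
  | x :: y :: rest => simp only [List.length_cons]; omega

theorem pvColL_len (schedule : List (List Int)) (t : Nat) :
    (pvColL schedule t).length = schedule.length := by
  rw [pvColL, List.length_map]

theorem pvColL_getD (schedule : List (List Int)) (t k : Nat) (hk : k < schedule.length) :
    (pvColL schedule t).getD k 0 = pvColAt schedule t k := by
  rw [pvColL, List.getD_eq_getElem _ _ (by rw [List.length_map]; exact hk), List.getElem_map,
    pvColAt, List.getD_eq_getElem _ _ hk]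

theorem pvInv_step (schedule : List (List Int)) (T : Nat) (gs : List (PySem.Set Int))
    (h : pvInv schedule T gs) : pvInv schedule (T + 1) (pvMinuteA (pvColL schedule T) gs) := by
  obtain ⟨hlen, hmem⟩ := h
  have hslen : (pvColL schedule T).length = schedule.length := pvColL_len schedule T
  refine ⟨by rw [pvMinuteA_len]; exact hlen, ?_⟩
  intro k hk
  have hkst : k < (pvColL schedule T).length := by omega
  have hgetD := pvMinuteA_getD (pvColL schedule T) gs (by omega) k hkst
  have hcolk : (pvColL schedule T).getD k 0 = pvColAt schedule T k := pvColL_getD schedule T k hk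
  obtain ⟨hnodk, hiffk⟩ := hmem k hk
  constructor
  · rw [hgetD]
    split
    · exact PySem.Set.nodup_union _ _ hnodk
    · exact hnodk
  · intro x
    rw [hgetD]
    constructor
    · intro hx
      by_cases hbig : 1 < (pvGroup (pvColL schedule T) ((pvColL schedule T).getD k 0)).length
      · rw [if_pos hbig] at hx
        rcases (PySem.Set.mem_union _ _ x).mp hx with hold | hgrp
        · obtain ⟨j, hj, rfl, hc⟩ := (hiffk _).mp hold
          refine ⟨j, hj, rfl, ?_⟩
          rcases hc with hc | ⟨t', ht', hcol⟩
          · exact Or.inl hc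
          · exact Or.inr ⟨t', by omega, hcol⟩
        · obtain ⟨j, hjst, hstop, rfl⟩ := (mem_pvGroup _ _ x).mp hgrp
          have hj : j < schedule.length := by omega
          refine ⟨j, hj, rfl, Or.inr ⟨T, by omega, ?_⟩⟩
          rw [pvColL_getD schedule T j hj, hcolk] at hstop
          exact hstop.symm
      · rw [if_neg hbig] at hx
        obtain ⟨j, hj, rfl, hc⟩ := (hiffk _).mp hx
        refine ⟨j, hj, rfl, ?_⟩
        rcases hc with hc | ⟨t', ht', hcol⟩
        · exact Or.inl hc
        · exact Or.inr ⟨t', by omega, hcol⟩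
    · rintro ⟨j, hj, rfl, hc⟩
      have hold_of : (k = j ∨ ∃ t' < T, pvColAt schedule t' k = pvColAt schedule t' j) →
          (j : Int) ∈ PySem.List.pyGetD gs (k : Int) PySem.Set.empty := by
        intro hc'
        exact (hiffk _).mpr ⟨j, hj, rfl, hc'⟩
      have hkeep : ∀ y, y ∈ PySem.List.pyGetD gs (k : Int) PySem.Set.empty →
          y ∈ (if 1 < (pvGroup (pvColL schedule T) ((pvColL schedule T).getD k 0)).length then
            PySem.Set.union (PySem.List.pyGetD gs (k : Int) PySem.Set.empty)
              (pvGroup (pvColL schedule T) ((pvColL schedule T).getD k 0))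
          else PySem.List.pyGetD gs (k : Int) PySem.Set.empty) := by
        intro y hy
        split
        · exact (PySem.Set.mem_union _ _ y).mpr (Or.inl hy)
        · exact hy
      rcases hc with rfl | ⟨t', ht', hcol⟩
      · exact hkeep _ (hold_of (Or.inl rfl))
      · by_cases ht'T : t' < T
        · exact hkeep _ (hold_of (Or.inr ⟨t', ht'T, hcol⟩))
        · have ht'eq : t' = T := by omega
          subst ht'eq
          by_cases hkj : k = j
          · exact hkeep _ (hold_of (Or.inl hkj))
          · have hjst : j < (pvColL schedule t').length := by omega
            have hjmem : ((j : Int)) ∈ pvGroup (pvColL schedule t') ((pvColL schedule t').getD k 0) := by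
              rw [natCast_mem_pvGroup _ _ j hjst, pvColL_getD schedule t' j hj, hcolk]
              exact hcol.symm
            have hkmem : ((k : Int)) ∈ pvGroup (pvColL schedule t') ((pvColL schedule t').getD k 0) := by
              rw [natCast_mem_pvGroup _ _ k hkst]
            have hbig : 1 < (pvGroup (pvColL schedule t') ((pvColL schedule t').getD k 0)).length :=
              pvOne_lt_length (fun hh : (k : Int) = (j : Int) => hkj (by exact_mod_cast hh))
                hkmem hjmem
            rw [if_pos hbig]
            exact (PySem.Set.mem_union _ _ _).mpr (Or.inr hjmem)

/- solved characterization -/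

theorem pvCard_lemma (n : Nat) (l : List Int) (hnd : l.Nodup)
    (hsub : ∀ x ∈ l, ∃ j : Nat, j < n ∧ x = (j : Int)) :
    n ≤ l.length ↔ ∀ j : Nat, j < n → ((j : Int) ∈ l) := by
  have hinj : Function.Injective (fun j : Nat => (j : Int)) := fun a b h => by
    simpa using h
  have hcard : ((Finset.range n).image (fun j : Nat => (j : Int))).card = n := by
    rw [Finset.card_image_of_injective _ hinj, Finset.card_range]
  have hlen : l.toFinset.card = l.length := List.toFinset_card_of_nodup hnd
  have hsub' : l.toFinset ⊆ (Finset.range n).image (fun j : Nat => (j : Int)) := by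
    intro x hx
    obtain ⟨j, hj, rfl⟩ := hsub x (List.mem_toFinset.mp hx)
    exact Finset.mem_image.mpr ⟨j, Finset.mem_range.mpr hj, rfl⟩
  constructor
  · intro hle j hj
    have : (Finset.range n).image (fun j : Nat => (j : Int)) = l.toFinset :=
      (Finset.eq_of_subset_of_card_le hsub' (by omega)).symm
    have : ((j : Int)) ∈ l.toFinset := by
      rw [← this]; exact Finset.mem_image.mpr ⟨j, Finset.mem_range.mpr hj, rfl⟩
    exact List.mem_toFinset.mp this
  · intro hall
    have : (Finset.range n).image (fun j : Nat => (j : Int)) ⊆ l.toFinset := by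
      intro x hx
      obtain ⟨j, hj, rfl⟩ := Finset.mem_image.mp hx
      exact List.mem_toFinset.mpr (hall j (Finset.mem_range.mp hj))
    have := Finset.card_le_card this
    omega

theorem pvSolved_char (schedule : List (List Int)) (T : Nat) (gs : List (PySem.Set Int))
    (h : pvInv schedule T gs) :
    pvSolved schedule.length gs = true ↔ pvSolvedLT schedule T := by
  obtain ⟨hlen, hmem⟩ := h
  have hent : ∀ k (hk : k < gs.length),
      PySem.List.pyGetD gs (k : Int) PySem.Set.empty = gs[k] := by
    intro k hk
    rw [PySem.List.pyGetD_natCast, List.getD_eq_getElem _ _ hk]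
  rw [pvSolved, List.all_eq_true]
  constructor
  · intro hall k hk j hj
    have hk' : k < gs.length := by omega
    have hg := hall gs[k] (List.getElem_mem hk')
    rw [decide_eq_true_eq, ← hent k hk'] at hg
    obtain ⟨hnod, hiff⟩ := hmem k hk
    have hsub : ∀ x ∈ PySem.List.pyGetD gs (k : Int) PySem.Set.empty,
        ∃ j' : Nat, j' < schedule.length ∧ x = (j' : Int) := by
      intro x hx
      obtain ⟨j', hj', rfl, _⟩ := (hiff _).mp hx
      exact ⟨j', hj', rfl⟩
    have hin := (pvCard_lemma schedule.length _ hnod hsub).mp hg j hj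
    obtain ⟨j', hj', hcast, hc⟩ := (hiff _).mp hin
    have : j' = j := by exact_mod_cast hcast.symm
    subst this
    exact hc
  · intro hsol g hg
    rw [decide_eq_true_eq]
    obtain ⟨k, hk', rfl⟩ := List.mem_iff_getElem.mp hg
    have hk : k < schedule.length := by omega
    obtain ⟨hnod, hiff⟩ := hmem k hk
    rw [← hent k hk']
    have hsub : ∀ x ∈ PySem.List.pyGetD gs (k : Int) PySem.Set.empty,
        ∃ j' : Nat, j' < schedule.length ∧ x = (j' : Int) := by
      intro x hx
      obtain ⟨j', hj', rfl, _⟩ := (hiff _).mp hx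
      exact ⟨j', hj', rfl⟩
    refine (pvCard_lemma schedule.length _ hnod hsub).mpr ?_
    intro j hj
    exact (hiff _).mpr ⟨j, hj, rfl, hsol k hk j hj⟩

/- enumerate of the transposed schedule -/

theorem pvEnum_eq (m : Nat) (f : Nat → List Int) :
    ∀ a : Nat, PySem.List.enumerate ((List.range' a m).map f) (a : Int)
      = (List.range' a m).map (fun t : Nat => ((t : Int), f t)) := by
  induction m with
  | zero => intro a; simp [List.range'_zero]
  | succ m ih =>
    intro a
    rw [List.range'_succ, List.map_cons, PySem.List.enumerate_cons, List.map_cons]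
    have : ((a : Int) + 1) = ((a + 1 : Nat) : Int) := by push_cast; ring
    rw [this, ih (a + 1)]

/- A's loop -/

theorem pvLoopA_eq (schedule : List (List Int)) :
    ∀ (b a : Nat) (gs : List (PySem.Set Int)), pvInv schedule a gs →
      pvLoopA schedule.length ((List.range' a b).map (fun t : Nat => ((t : Int), pvColL schedule t))) gs
        = match (List.range' a b).find? (fun t => pvSolvedLTb schedule (t + 1)) with
          | some t => some (PySem.Int.toStr ((t : Int) + 1))
          | none => none := by
  intro b
  induction b with
  | zero => intro a gs _; rw [List.range'_zero]; rfl
  | succ b ih =>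
    intro a gs hInv
    rw [List.range'_succ, List.map_cons, pvLoopA_cons]
    have hInv' := pvInv_step schedule a gs hInv
    have hchar := pvSolved_char schedule (a + 1) _ hInv'
    by_cases hS : pvSolvedLT schedule (a + 1)
    · rw [if_pos (hchar.mpr hS),
        List.find?_cons_of_pos (by rw [pvSolvedLTb_iff]; exact hS)]
    · rw [if_neg (by rw [hchar]; exact hS),
        List.find?_cons_of_neg (by rw [pvSolvedLTb_iff]; exact hS), ih (a + 1) _ hInv']

theorem pvSolved_init (n : Nat) :
    pvSolved n ((List.range n).map (fun i : Nat => PySem.Set.ofList [(i : Int)])) = decide (n ≤ 1) := by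
  rw [Bool.eq_iff_iff, decide_eq_true_eq, pvSolved, List.all_eq_true]
  constructor
  · intro h
    by_contra hn
    push Not at hn
    have h0 := h (PySem.Set.ofList [((0 : Nat) : Int)])
      (List.mem_map.mpr ⟨0, List.mem_range.mpr (by omega), rfl⟩)
    rw [decide_eq_true_eq] at h0
    have : PySem.Set.ofList [((0 : Nat) : Int)] = [((0 : Nat) : Int)] := rfl
    rw [this, List.length_singleton] at h0
    omega
  · intro h g hg
    rw [decide_eq_true_eq]
    obtain ⟨i, hi, rfl⟩ := List.mem_map.mp hg
    have : PySem.Set.ofList [(i : Int)] = [(i : Int)] := rfl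
    rw [this, List.length_singleton]
    exact h

theorem pvInv_init (schedule : List (List Int)) :
    pvInv schedule 0 ((List.range schedule.length).map (fun i : Nat => PySem.Set.ofList [(i : Int)])) := by
  refine ⟨by simp, fun k hk => ?_⟩
  have hent : PySem.List.pyGetD
      ((List.range schedule.length).map (fun i : Nat => PySem.Set.ofList [(i : Int)])) (k : Int)
      PySem.Set.empty = [(k : Int)] := by
    rw [PySem.List.pyGetD_natCast,
      List.getD_eq_getElem _ _ (by simp [hk]), List.getElem_map, List.getElem_range]
    rfl
  rw [hent]
  refine ⟨List.nodup_singleton _, fun x => ?_⟩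
  constructor
  · intro hx
    rw [List.mem_singleton] at hx
    exact ⟨k, hk, hx, Or.inl rfl⟩
  · rintro ⟨j, hj, rfl, hc⟩
    rcases hc with rfl | ⟨t', ht', _⟩
    · exact List.mem_singleton.mpr rfl
    · omega

/- B's pieces -/

theorem pvFirstMeetB_eq (ri rj : List Int) :
    ∀ ts : List Nat, pvFirstMeetB ri rj ts
      = (ts.find? (fun t => ri.getD t 0 == rj.getD t 0)).map (· + 1) := by
  intro ts
  induction ts with
  | nil => rfl
  | cons t rest ih =>
    by_cases h : ri.getD t 0 = rj.getD t 0
    · rw [pvFirstMeetB, if_pos (by simpa using h), List.find?_cons_of_pos (by simpa using h)]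
      rfl
    · rw [pvFirstMeetB, if_neg (by simpa using h), List.find?_cons_of_neg (by simpa using h), ih]

theorem pvFind?_range'_eq_some {p : Nat → Bool} {a b t : Nat} :
    (List.range' a b).find? p = some t ↔
      (a ≤ t ∧ t < a + b ∧ p t = true ∧ ∀ s, a ≤ s → s < t → p s = false) := by
  induction b generalizing a with
  | zero => simp [List.range'_zero]; omega
  | succ b ih =>
    rw [List.range'_succ]
    by_cases hpa : p a = true
    · rw [List.find?_cons_of_pos hpa]
      constructor
      · rintro h
        have : a = t := by simpa using h
        subst this
        exact ⟨le_refl _, by omega, hpa, fun s h1 h2 => by omega⟩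
      · rintro ⟨h1, h2, h3, h4⟩
        have : a = t := by
          by_contra hne
          have := h4 a (le_refl _) (by omega)
          rw [this] at hpa; exact absurd hpa (by simp)
        simp [this]
    · rw [List.find?_cons_of_neg hpa, ih]
      constructor
      · rintro ⟨h1, h2, h3, h4⟩
        refine ⟨by omega, by omega, h3, fun s hs1 hs2 => ?_⟩
        rcases Nat.eq_or_lt_of_le hs1 with rfl | h
        · simpa using hpa
        · exact h4 s h hs2
      · rintro ⟨h1, h2, h3, h4⟩
        have hat : a ≠ t := by rintro rfl; rw [h3] at hpa; exact hpa rfl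
        exact ⟨by omega, by omega, h3, fun s hs1 hs2 => h4 s (by omega) hs2⟩

theorem pvLoopB_never (schedule : List (List Int)) (m : Nat) :
    ∀ (pairs : List (Nat × Nat)) (worst : Nat),
      (∃ p ∈ pairs, pvFMn schedule m p.1 p.2 = none) →
      pvLoopB schedule m pairs worst = "never" := by
  intro pairs
  induction pairs with
  | nil => rintro worst ⟨p, hp, _⟩; simp at hp
  | cons q rest ih =>
    rintro worst ⟨p, hp, hnone⟩
    obtain ⟨i, j⟩ := q
    rw [pvLoopB]
    cases hq : pvFirstMeetB (schedule.getD i []) (schedule.getD j []) (List.range m) with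
    | none => rfl
    | some v =>
      rcases List.mem_cons.mp hp with rfl | hmem
      · simp only [pvFMn] at hnone
        rw [hnone] at hq; cases hq
      · exact ih _ ⟨p, hmem, hnone⟩

theorem pvLoopB_some (schedule : List (List Int)) (m : Nat) :
    ∀ (pairs : List (Nat × Nat)) (worst : Nat),
      (∀ p ∈ pairs, (pvFMn schedule m p.1 p.2).isSome) →
      pvLoopB schedule m pairs worst
        = PySem.Int.toStr
            ((pairs.foldl (fun w p => max w ((pvFMn schedule m p.1 p.2).getD 0)) worst : Nat) : Int) := by
  intro pairs
  induction pairs with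
  | nil => intro worst _; rfl
  | cons q rest ih =>
    intro worst hall
    obtain ⟨i, j⟩ := q
    have hq := hall (i, j) (by simp)
    rw [Option.isSome_iff_exists] at hq
    obtain ⟨v, hv⟩ := hq
    have hv' : pvFirstMeetB (schedule.getD i []) (schedule.getD j []) (List.range m) = some v := hv
    rw [pvLoopB, hv']
    simp only []
    rw [ih _ (fun p hp => hall p (by simp [hp]))]
    congr 2
    simp only [List.foldl_cons, pvFMn, hv', Option.getD_some]
    congr 1
    split <;> omega

theorem pvMem_pairs (n : Nat) (p : Nat × Nat) :
    p ∈ (List.range n).flatMap (fun i => (List.range i).map (fun j => (i, j))) ↔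
      p.2 < p.1 ∧ p.1 < n := by
  obtain ⟨i, j⟩ := p
  simp only [List.mem_flatMap, List.mem_range, List.mem_map, Prod.mk.injEq]
  constructor
  · rintro ⟨a, ha, b, hb, rfl, rfl⟩; exact ⟨hb, ha⟩
  · rintro ⟨h1, h2⟩; exact ⟨i, h2, j, h1, rfl, rfl⟩

/- Nat foldl-max helpers -/

theorem pvFoldlMax_le {α : Type} (f : α → Nat) (c : Nat) :
    ∀ (l : List α) (init : Nat), init ≤ c → (∀ x ∈ l, f x ≤ c) →
      l.foldl (fun w p => max w (f p)) init ≤ c := by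
  intro l
  induction l with
  | nil => intro init h _; simpa using h
  | cons x rest ih =>
    intro init h hall
    simp only [List.foldl_cons]
    exact ih _ (by have := hall x (by simp); omega) (fun y hy => hall y (by simp [hy]))

theorem pvLe_foldlMax {α : Type} (f : α → Nat) :
    ∀ (l : List α) (init : Nat),
      init ≤ l.foldl (fun w p => max w (f p)) init ∧
      ∀ x ∈ l, f x ≤ l.foldl (fun w p => max w (f p)) init := by
  intro l
  induction l with
  | nil => intro init; simp
  | cons x rest ih =>
    intro init
    simp only [List.foldl_cons]
    obtain ⟨h1, h2⟩ := ih (max init (f x))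
    refine ⟨by omega, ?_⟩
    intro y hy
    rcases List.mem_cons.mp hy with rfl | hy'
    · omega
    · exact h2 y hy' 

/- glue -/

theorem pvFMn_none_iff (schedule : List (List Int)) (m i j : Nat) :
    pvFMn schedule m i j = none ↔
      ∀ t < m, pvColAt schedule t i ≠ pvColAt schedule t j := by
  rw [pvFMn, pvFirstMeetB_eq]
  simp only [Option.map_eq_none_iff, List.find?_eq_none, List.mem_range, beq_iff_eq]
  exact Iff.rfl

theorem pvFMn_some (schedule : List (List Int)) (m i j v : Nat)
    (h : pvFMn schedule m i j = some v) :
    ∃ t, t < m ∧ v = t + 1 ∧ pvColAt schedule t i = pvColAt schedule t j ∧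
      ∀ s < t, pvColAt schedule s i ≠ pvColAt schedule s j := by
  rw [pvFMn, pvFirstMeetB_eq] at h
  rw [Option.map_eq_some_iff] at h
  obtain ⟨t, hfind, rfl⟩ := h
  rw [List.range_eq_range'] at hfind
  obtain ⟨_, htm, hp, hmin⟩ := pvFind?_range'_eq_some.mp hfind
  refine ⟨t, by omega, rfl, by simpa using hp, fun s hs => ?_⟩
  have := hmin s (by omega) hs
  simpa using this

theorem pvGlue_some (schedule : List (List Int)) (m : Nat) (h2 : 2 ≤ schedule.length) (t : Nat)
    (hfind : (List.range' 0 m).find? (fun t => pvSolvedLTb schedule (t + 1)) = some t) :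
    pvLoopB schedule m
        ((List.range schedule.length).flatMap (fun i => (List.range i).map (fun j => (i, j)))) 0
      = PySem.Int.toStr ((t : Int) + 1) := by
  obtain ⟨_, htm, hPb, hminb⟩ := pvFind?_range'_eq_some.mp hfind
  rw [pvSolvedLTb_iff] at hPb
  have hmeet : ∀ k < schedule.length, ∀ j < schedule.length, k ≠ j →
      ∃ t' ≤ t, pvColAt schedule t' k = pvColAt schedule t' j := by
    intro k hk j hj hkj
    rcases hPb k hk j hj with he | ⟨t', ht', hcol⟩
    · exact absurd he hkj
    · exact ⟨t', by omega, hcol⟩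
  have hallsome : ∀ p ∈ (List.range schedule.length).flatMap
      (fun i => (List.range i).map (fun j => (i, j))),
      (pvFMn schedule m p.1 p.2).isSome := by
    intro p hp
    obtain ⟨hji, hin⟩ := (pvMem_pairs _ p).mp hp
    obtain ⟨t', ht', hcol⟩ := hmeet p.1 hin p.2 (by omega) (by omega)
    rw [Option.isSome_iff_ne_none]
    intro hnone
    exact (pvFMn_none_iff schedule m p.1 p.2).mp hnone t' (by omega) hcol
  rw [pvLoopB_some _ _ _ 0 hallsome]
  have hW := pvLe_foldlMax (fun p : Nat × Nat => (pvFMn schedule m p.1 p.2).getD 0)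
    ((List.range schedule.length).flatMap (fun i => (List.range i).map (fun j => (i, j)))) 0
  have hfmv : ∀ p ∈ (List.range schedule.length).flatMap
      (fun i => (List.range i).map (fun j => (i, j))),
      (pvFMn schedule m p.1 p.2).getD 0 ≤ t + 1 := by
    intro p hp
    obtain ⟨hji, hin⟩ := (pvMem_pairs _ p).mp hp
    obtain ⟨v, hv⟩ := Option.isSome_iff_exists.mp (hallsome p hp)
    obtain ⟨tp, htpm, rfl, hcol, hmin⟩ := pvFMn_some schedule m p.1 p.2 v hv
    rw [hv, Option.getD_some]
    obtain ⟨t', ht', hcol'⟩ := hmeet p.1 hin p.2 (by omega) (by omega)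
    have : ¬ (t' < tp) := fun hlt => hmin t' hlt hcol'
    omega
  have hWle : ((List.range schedule.length).flatMap
      (fun i => (List.range i).map (fun j => (i, j)))).foldl
        (fun w p => max w ((pvFMn schedule m p.1 p.2).getD 0)) 0 ≤ t + 1 :=
    pvFoldlMax_le _ _ _ 0 (by omega) hfmv
  have hWge : t + 1 ≤ ((List.range schedule.length).flatMap
      (fun i => (List.range i).map (fun j => (i, j)))).foldl
        (fun w p => max w ((pvFMn schedule m p.1 p.2).getD 0)) 0 := by
    cases t with
    | zero =>
      have hp10 : ((1, 0) : Nat × Nat) ∈ (List.range schedule.length).flatMap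
          (fun i => (List.range i).map (fun j => (i, j))) :=
        (pvMem_pairs _ _).mpr ⟨by omega, by omega⟩
      obtain ⟨v, hv⟩ := Option.isSome_iff_exists.mp (hallsome _ hp10)
      obtain ⟨tp, _, rfl, _, _⟩ := pvFMn_some schedule m 1 0 v hv
      have := hW.2 (1, 0) hp10
      rw [hv, Option.getD_some] at this
      omega
    | succ s =>
      have hns := hminb s (by omega) (by omega)
      have hns' : ¬ pvSolvedLT schedule (s + 1) := by
        rw [← pvSolvedLTb_iff, hns]; simp
      rw [pvSolvedLT] at hns'
      push Not at hns'
      obtain ⟨k, hk, j, hj, hkj, hnomeet⟩ := hns'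
      -- ordered pair
      rcases Nat.lt_or_ge j k with hjk | hkj'
      · -- pair (k, j)
        have hpmem : ((k, j) : Nat × Nat) ∈ (List.range schedule.length).flatMap
            (fun i => (List.range i).map (fun j => (i, j))) :=
          (pvMem_pairs _ _).mpr ⟨hjk, hk⟩
        obtain ⟨v, hv⟩ := Option.isSome_iff_exists.mp (hallsome _ hpmem)
        obtain ⟨tp, _, rfl, hcol, _⟩ := pvFMn_some schedule m k j v hv
        have htp : ¬ (tp < s + 1) := fun hlt => hnomeet tp hlt hcol
        have := hW.2 (k, j) hpmem
        rw [hv, Option.getD_some] at this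
        omega
      · have hjk : k < j := by omega
        have hpmem : ((j, k) : Nat × Nat) ∈ (List.range schedule.length).flatMap
            (fun i => (List.range i).map (fun j => (i, j))) :=
          (pvMem_pairs _ _).mpr ⟨hjk, hj⟩
        obtain ⟨v, hv⟩ := Option.isSome_iff_exists.mp (hallsome _ hpmem)
        obtain ⟨tp, _, rfl, hcol, _⟩ := pvFMn_some schedule m j k v hv
        have htp : ¬ (tp < s + 1) := fun hlt => hnomeet tp hlt hcol.symm
        have := hW.2 (j, k) hpmem
        rw [hv, Option.getD_some] at this
        omega
  congr 1
  have : ((List.range schedule.length).flatMap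
      (fun i => (List.range i).map (fun j => (i, j)))).foldl
        (fun w p => max w ((pvFMn schedule m p.1 p.2).getD 0)) 0 = t + 1 := by omega
  rw [this]
  push_cast
  ring

theorem pvGlue_none (schedule : List (List Int)) (m : Nat) (h2 : 2 ≤ schedule.length)
    (hfind : (List.range' 0 m).find? (fun t => pvSolvedLTb schedule (t + 1)) = none) :
    pvLoopB schedule m
        ((List.range schedule.length).flatMap (fun i => (List.range i).map (fun j => (i, j)))) 0
      = "never" := by
  have hall : ∀ t < m, ¬ pvSolvedLT schedule (t + 1) := by
    intro t htm hS
    have := List.find?_eq_none.mp hfind t (List.mem_range'_1.mpr (by omega))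
    rw [pvSolvedLTb_iff] at this
    exact this hS
  by_cases hex : ∃ p ∈ (List.range schedule.length).flatMap
      (fun i => (List.range i).map (fun j => (i, j))), pvFMn schedule m p.1 p.2 = none
  · exact pvLoopB_never schedule m _ 0 hex
  · exfalso
    push Not at hex
    have hallsome : ∀ p ∈ (List.range schedule.length).flatMap
        (fun i => (List.range i).map (fun j => (i, j))),
        (pvFMn schedule m p.1 p.2).isSome := by
      intro p hp
      rw [Option.isSome_iff_ne_none]
      exact hex p hp
    have hW := pvLe_foldlMax (fun p : Nat × Nat => (pvFMn schedule m p.1 p.2).getD 0)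
      ((List.range schedule.length).flatMap (fun i => (List.range i).map (fun j => (i, j)))) 0
    set W := ((List.range schedule.length).flatMap
      (fun i => (List.range i).map (fun j => (i, j)))).foldl
        (fun w p => max w ((pvFMn schedule m p.1 p.2).getD 0)) 0 with hWdef
    have hp10 : ((1, 0) : Nat × Nat) ∈ (List.range schedule.length).flatMap
        (fun i => (List.range i).map (fun j => (i, j))) :=
      (pvMem_pairs _ _).mpr ⟨by omega, by omega⟩
    have hW1 : 1 ≤ W := by
      obtain ⟨v, hv⟩ := Option.isSome_iff_exists.mp (hallsome _ hp10)
      obtain ⟨tp, _, rfl, _, _⟩ := pvFMn_some schedule m 1 0 v hv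
      have := hW.2 (1, 0) hp10
      rw [hv, Option.getD_some] at this
      omega
    have hWm : W ≤ m := by
      refine pvFoldlMax_le _ _ _ 0 (by omega) ?_
      intro p hp
      obtain ⟨v, hv⟩ := Option.isSome_iff_exists.mp (hallsome p hp)
      obtain ⟨tp, htpm, rfl, _, _⟩ := pvFMn_some schedule m p.1 p.2 v hv
      rw [hv, Option.getD_some]
      omega
    have hSolved : pvSolvedLT schedule W := by
      intro k hk j hj
      by_cases hkj : k = j
      · exact Or.inl hkj
      · refine Or.inr ?_
        rcases Nat.lt_or_ge j k with hjk | hkj'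
        · have hpmem : ((k, j) : Nat × Nat) ∈ (List.range schedule.length).flatMap
              (fun i => (List.range i).map (fun j => (i, j))) :=
            (pvMem_pairs _ _).mpr ⟨hjk, hk⟩
          obtain ⟨v, hv⟩ := Option.isSome_iff_exists.mp (hallsome _ hpmem)
          obtain ⟨tp, _, rfl, hcol, _⟩ := pvFMn_some schedule m k j v hv
          have := hW.2 (k, j) hpmem
          rw [hv, Option.getD_some] at this
          exact ⟨tp, by omega, hcol⟩
        · have hjk : k < j := by omega
          have hpmem : ((j, k) : Nat × Nat) ∈ (List.range schedule.length).flatMap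
              (fun i => (List.range i).map (fun j => (i, j))) :=
            (pvMem_pairs _ _).mpr ⟨hjk, hj⟩
          obtain ⟨v, hv⟩ := Option.isSome_iff_exists.mp (hallsome _ hpmem)
          obtain ⟨tp, _, rfl, hcol, _⟩ := pvFMn_some schedule m j k v hv
          have := hW.2 (j, k) hpmem
          rw [hv, Option.getD_some] at this
          exact ⟨tp, by omega, hcol.symm⟩
    have := hall (W - 1) (by omega)
    have hWeq : W - 1 + 1 = W := by omega
    rw [hWeq] at this
    exact this hSolved

theorem pvMain (schedule : List (List Int)) :
    gossiping_bus_tour schedule = gossiping_bus_tour_alt schedule := by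
  unfold gossiping_bus_tour gossiping_bus_tour_alt
  simp only []
  rw [pvSolved_init]
  by_cases h1 : schedule.length ≤ 1
  · rw [if_pos (by simpa using h1), if_pos h1]
  · rw [if_neg (by simpa using h1), if_neg h1]
    cases schedule with
    | nil => exact absurd (by simp) h1
    | cons l0 rest =>
      have h2 : 2 ≤ (l0 :: rest).length := by
        rw [List.length_cons]
        rw [List.length_cons] at h1
        omega
      have hz : pvZipStar (l0 :: rest)
          = (List.range' 0 (pvMinRowLen l0 rest)).map (fun t => pvColL (l0 :: rest) t) := by
        rw [show pvZipStar (l0 :: rest)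
            = (List.range (pvMinRowLen l0 rest)).map (fun t => pvColL (l0 :: rest) t) from rfl,
          List.range_eq_range']
      rw [hz]
      have he : PySem.List.enumerate
          ((List.range' 0 (pvMinRowLen l0 rest)).map (fun t => pvColL (l0 :: rest) t)) 0
          = (List.range' 0 (pvMinRowLen l0 rest)).map
              (fun t : Nat => ((t : Int), pvColL (l0 :: rest) t)) := by
        have := pvEnum_eq (pvMinRowLen l0 rest) (fun t => pvColL (l0 :: rest) t) 0
        simpa using this
      rw [he, pvLoopA_eq (l0 :: rest) (pvMinRowLen l0 rest) 0 _ (pvInv_init _)]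
      cases hfind : (List.range' 0 (pvMinRowLen l0 rest)).find?
          (fun t => pvSolvedLTb (l0 :: rest) (t + 1)) with
      | some t =>
        rw [pvGlue_some (l0 :: rest) (pvMinRowLen l0 rest) h2 t hfind]
      | none =>
        rw [pvGlue_none (l0 :: rest) (pvMinRowLen l0 rest) h2 hfind]
        exact ite_self _

-- ===== VERDICT (by name: the statement is the Claim_ definition above) =====
theorem gossiping_bus_tour_spec : Claim_equal_gossiping_bus_tour := by
  intro schedule _
  unfold Spec_gossiping_bus_tour
  exact pvMain schedule
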